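-- pv_equiv track=rewrite | github.com/amaralvin7/invPOC | src/unpack.py | unpack_tracers
-- ===== SOURCE A (Python) =====
-- def slice_by_species(to_slice, element, state_elements):
--     """Get all values from a list that correspond to a given state element."""
--     sliced = [to_slice[i] for i, e in enumerate(
--         state_elements) if e.split('_')[0] == element]
--
--     return sliced
--
-- def unpack_tracers(tracers, state_elements, x, x_e):
--     """Unpack tracer estimates into a dictionary."""
--     tracer_estimates = {t: {} for t in tracers}
--
--     for t in tracer_estimates:
--         tracer_estimates[t]['posterior'] = slice_by_species(
--             x, t, state_elements)
--         tracer_estimates[t]['posterior_e'] = slice_by_species(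
--             x_e, t, state_elements)
--
--     return tracer_estimates
-- ===== SOURCE B (Python) =====
-- def unpack_tracers(tracers, state_elements, x, x_e):
--     """Unpack tracer estimates into a dictionary (single-pass grouping)."""
--     groups = {}
--     for e, xv, xev in zip(state_elements, x, x_e):
--         k = e.split('_')[0]
--         if k not in groups:
--             groups[k] = ([], [])
--         p, pe = groups[k]
--         p.append(xv)
--         pe.append(xev)
--     result = {}
--     for t in tracers:
--         p, pe = groups.get(t, ([], []))
--         result[t] = {'posterior': p, 'posterior_e': pe}
--     return result
-- ===== Notes on version B (the rewrite author's own statement) =====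
-- stated objective: faster
-- what changed: Replaces the per-tracer rescans of state_elements (slice_by_species called twice for every tracer) with a single zip pass that groups (x, x_e) values by state-element prefix into a dict, then assembles each tracer's entry by one lookup.
import Mathlib
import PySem

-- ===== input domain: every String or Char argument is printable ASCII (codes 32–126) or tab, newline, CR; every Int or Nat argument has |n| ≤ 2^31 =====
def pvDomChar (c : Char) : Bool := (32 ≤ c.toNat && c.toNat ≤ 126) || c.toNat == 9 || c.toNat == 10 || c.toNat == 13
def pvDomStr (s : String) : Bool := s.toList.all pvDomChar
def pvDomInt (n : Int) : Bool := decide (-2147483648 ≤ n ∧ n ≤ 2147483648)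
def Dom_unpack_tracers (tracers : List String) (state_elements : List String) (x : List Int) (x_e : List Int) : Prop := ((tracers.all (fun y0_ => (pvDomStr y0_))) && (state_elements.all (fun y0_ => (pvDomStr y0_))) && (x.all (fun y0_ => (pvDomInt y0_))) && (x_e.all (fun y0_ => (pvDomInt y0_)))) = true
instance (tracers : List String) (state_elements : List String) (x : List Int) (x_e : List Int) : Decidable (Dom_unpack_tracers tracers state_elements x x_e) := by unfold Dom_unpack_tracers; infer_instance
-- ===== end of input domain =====

-- B replaces A's per-tracer rescans of state_elements with one zip pass grouping values by
-- prefix into a dict, then one lookup per tracer; equivalence proved on Pre_ (where A returns).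


-- shared helper: e.split('_')[0]
def pvPrefix (s : String) : List Char := (PySem.Chars.splitOn s.toList ['_']).getD 0 []

-- ===== PORT A =====
-- sliced = [to_slice[i] for i, e in enumerate(state_elements) if e.split('_')[0] == element]
-- (pyGet? = none is Python's IndexError; the .getD 0 is only reached outside Pre_)
def pvSliceBySpecies (to_slice : List Int) (element : String) (state_elements : List String) : List Int :=
  ((PySem.List.enumerate state_elements).filter (fun p => pvPrefix p.2 == element.toList)).map
    (fun p => (PySem.List.pyGet? to_slice p.1).getD 0)

def unpack_tracers (tracers : List String) (state_elements : List String) (x : List Int) (x_e : List Int) : List (String × List (String × List Int)) :=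
  -- tracer_estimates = {t: {} for t in tracers}
  let te : PySem.Dict String (PySem.Dict String (List Int)) :=
    tracers.foldl (fun d t => d.insert t PySem.Dict.empty) PySem.Dict.empty
  -- for t in tracer_estimates: te[t]['posterior'] = slice(x, t, se); te[t]['posterior_e'] = slice(x_e, t, se)
  let te2 := te.keys.foldl (fun d t =>
    let d1 := d.insert t ((d.getD t PySem.Dict.empty).insert "posterior" (pvSliceBySpecies x t state_elements))
    d1.insert t ((d1.getD t PySem.Dict.empty).insert "posterior_e" (pvSliceBySpecies x_e t state_elements))) te
  te2.items.map (fun p => (p.1, p.2.items))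

-- ===== PORT B =====
-- loop body of: k = e.split('_')[0]; if k not in groups: groups[k] = ([], []); append xv, xev
def pvGroupStep (g : PySem.Dict (List Char) (List Int × List Int)) (q : String × Int × Int) : PySem.Dict (List Char) (List Int × List Int) :=
  let k := pvPrefix q.1
  let pr := g.getD k ([], [])
  g.insert k (pr.1 ++ [q.2.1], pr.2 ++ [q.2.2])

def unpack_tracers_alt (tracers : List String) (state_elements : List String) (x : List Int) (x_e : List Int) : List (String × List (String × List Int)) :=
  -- for e, xv, xev in zip(state_elements, x, x_e): group by prefix
  let groups : PySem.Dict (List Char) (List Int × List Int) :=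
    (state_elements.zip (x.zip x_e)).foldl pvGroupStep PySem.Dict.empty
  -- for t in tracers: result[t] = {'posterior': p, 'posterior_e': pe}
  let result : PySem.Dict String (List (String × List Int)) :=
    tracers.foldl (fun r t =>
      let pr := groups.getD t.toList ([], [])
      r.insert t [("posterior", pr.1), ("posterior_e", pr.2)]) PySem.Dict.empty
  result.items

-- ===== PRECONDITION & SPEC =====
-- Pre_: exactly the inputs where A returns — every state element whose prefix occurs in
-- tracers has its index inside both x and x_e (otherwise to_slice[i] raises IndexError).
def Pre_unpack_tracers (tracers : List String) (state_elements : List String) (x : List Int) (x_e : List Int) : Prop :=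
  ∀ p ∈ PySem.List.enumerate state_elements, pvPrefix p.2 ∈ tracers.map (fun t => t.toList) → p.1 < (x.length : Int) ∧ p.1 < (x_e.length : Int)
instance (tracers : List String) (state_elements : List String) (x : List Int) (x_e : List Int) : Decidable (Pre_unpack_tracers tracers state_elements x x_e) := by unfold Pre_unpack_tracers; infer_instance

def pvWitness_unpack_tracers : List String × List String × List Int × List Int :=
  (["POC", "DOP"], ["POC_s", "POC_l", "DOP", "other"], [1, 2, 3, 4], [5, 6, 7, 8])

def Spec_unpack_tracers (tracers : List String) (state_elements : List String) (x : List Int) (x_e : List Int) (out : List (String × List (String × List Int))) : Prop := out = unpack_tracers_alt tracers state_elements x x_e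
instance (tracers : List String) (state_elements : List String) (x : List Int) (x_e : List Int) (out : List (String × List (String × List Int))) : Decidable (Spec_unpack_tracers tracers state_elements x x_e out) := by unfold Spec_unpack_tracers; infer_instance

-- ===== CLAIM (what is proved, stated in full; the proofs are below) =====
def Claim_equal_unpack_tracers : Prop := ∀ (tracers : List String) (state_elements : List String) (x : List Int) (x_e : List Int), Dom_unpack_tracers tracers state_elements x x_e → Pre_unpack_tracers tracers state_elements x x_e → Spec_unpack_tracers tracers state_elements x x_e (unpack_tracers tracers state_elements x x_e)

-- ===== LEMMAS AND PROOFS =====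

-- A dict built by inserting (t, v t) for each t of l, from empty: items = first-occurrence dedup of l, values v.
theorem pv_items_foldl_insert_fn {ν : Type} (f : PySem.Dict String ν → String → PySem.Dict String ν)
    (v : String → ν) (hf : ∀ d t, f d t = d.insert t (v t)) (l : List String) :
    (l.foldl f PySem.Dict.empty).items = (PySem.List.dedup l).map (fun t => (t, v t)) := by
  induction l using List.reverseRecOn with
  | nil => rfl
  | append_singleton l t ih =>
      rw [List.foldl_append, List.foldl_cons, List.foldl_nil, hf, PySem.Dict.items_insert, ih,
        PySem.List.dedup_eq_ofList, PySem.List.dedup_eq_ofList, PySem.Set.ofList_append,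
        show PySem.Set.update (PySem.Set.ofList l) [t] = PySem.Set.add (PySem.Set.ofList l) t from rfl,
        PySem.Set.add]
      have hc : (List.foldl f PySem.Dict.empty l).contains t
          = (PySem.Set.ofList l).contains t := by
        have h1 : (List.foldl f PySem.Dict.empty l).contains t = true ↔ t ∈ l := by
          rw [PySem.Dict.contains_iff_mem_keys]
          simp only [PySem.Dict.keys, ih, List.map_map]
          simp [Function.comp_def]
        have h2 : (PySem.Set.ofList l).contains t = true ↔ t ∈ l := by
          rw [PySem.Set.contains_iff, PySem.Set.mem_ofList]
        rw [Bool.eq_iff_iff]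
        simp only [h1, h2]
      rw [hc]
      by_cases ht : (PySem.Set.ofList l).contains t = true
      · rw [if_pos ht, if_pos ht, List.map_map]
        apply List.map_congr_left
        intro a _
        simp only [Function.comp]
        split_ifs with h
        · simp at h; subst h; rfl
        · rfl
      · rw [if_neg ht, if_neg ht, List.map_append]
        rfl

-- keys of such a dict: the dedup of l.
theorem pv_keys_foldl_insert_fn {ν : Type} (f : PySem.Dict String ν → String → PySem.Dict String ν)
    (v : String → ν) (hf : ∀ d t, f d t = d.insert t (v t)) (l : List String) :
    (l.foldl f PySem.Dict.empty).keys = PySem.List.dedup l := by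
  simp only [PySem.Dict.keys, pv_items_foldl_insert_fn f v hf l, List.map_map]
  exact (List.map_congr_left (g := fun u => u) (fun u _ => rfl)).trans (List.map_id' _)

-- A's slice over enumerate equals the zip-filter projection, given in-range matching indices.
theorem pv_slice_eq_zip (t : List Char) (se : List String) :
    ∀ (s : Nat) (x xe : List Int),
    (∀ p ∈ PySem.List.enumerate se (s : Int), pvPrefix p.2 = t → p.1 < (x.length : Int) ∧ p.1 < (xe.length : Int)) →
    (((PySem.List.enumerate se (s : Int)).filter (fun p => pvPrefix p.2 == t)).map
        (fun p => (PySem.List.pyGet? x p.1).getD 0)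
      = ((se.zip ((x.drop s).zip (xe.drop s))).filter (fun q => pvPrefix q.1 == t)).map (fun q => q.2.1))
    ∧ (((PySem.List.enumerate se (s : Int)).filter (fun p => pvPrefix p.2 == t)).map
        (fun p => (PySem.List.pyGet? xe p.1).getD 0)
      = ((se.zip ((x.drop s).zip (xe.drop s))).filter (fun q => pvPrefix q.1 == t)).map (fun q => q.2.2)) := by
  induction se with
  | nil => intro s x xe _; simp [PySem.List.enumerate_nil]
  | cons e se ih =>
      intro s x xe h
      rw [PySem.List.enumerate_cons]
      by_cases hx : s < x.length ∧ s < xe.length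
      · have hdx := List.drop_eq_getElem_cons hx.1
        have hdxe := List.drop_eq_getElem_cons hx.2
        rw [hdx, hdxe, List.zip_cons_cons, List.zip_cons_cons]
        have hcast : (s : Int) + 1 = ((s + 1 : Nat) : Int) := by push_cast; ring
        have hih := ih (s + 1) x xe (by
          intro p hp hpt
          exact h p (by rw [PySem.List.enumerate_cons, hcast]; exact List.mem_cons_of_mem _ hp) hpt)
        rw [hcast]
        obtain ⟨ih1, ih2⟩ := hih
        constructor
        · rw [List.filter_cons, List.filter_cons]
          by_cases hm : (pvPrefix e == t) = true
          · simp only [hm, if_pos]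
            rw [List.map_cons, List.map_cons, ih1]
            congr 1
            simp [PySem.List.pyGet?_natCast, List.getElem?_eq_getElem hx.1]
          · simp only [hm, Bool.false_eq_true, if_neg, not_false_iff]
            exact ih1
        · rw [List.filter_cons, List.filter_cons]
          by_cases hm : (pvPrefix e == t) = true
          · simp only [hm, if_pos]
            rw [List.map_cons, List.map_cons, ih2]
            congr 1
            simp [PySem.List.pyGet?_natCast, List.getElem?_eq_getElem hx.2]
          · simp only [hm, Bool.false_eq_true, if_neg, not_false_iff]
            exact ih2
      · have hz : (x.drop s).zip (xe.drop s) = ([] : List (Int × Int)) := by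
          rcases Nat.lt_or_ge s x.length with h1 | h1
          · have hd : xe.drop s = [] := List.drop_eq_nil_of_le (by omega)
            simp [hd]
          · have hd : x.drop s = [] := List.drop_eq_nil_of_le (by omega)
            simp [hd]
        rw [hz]
        have hfil : ((((s : Int), e) :: PySem.List.enumerate se ((s : Int) + 1)).filter
            (fun p => pvPrefix p.2 == t)) = [] := by
          rw [List.filter_eq_nil_iff]
          intro p hp hpt
          have hpt' : pvPrefix p.2 = t := by simpa using hpt
          have hb := h p (by rw [PySem.List.enumerate_cons]; exact hp) hpt'
          have hge : (s : Int) ≤ p.1 := by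
            rcases List.mem_cons.mp hp with h0 | h0
            · rw [h0]
            · obtain ⟨k, hk, hpk⟩ := (PySem.List.mem_enumerate_iff _ _ _).mp h0
              rw [hpk]; simp; omega
          omega
        rw [hfil]
        simp

-- B's grouping fold: lookup of k returns the filtered projections appended to the accumulator's entry.
theorem pv_getD_groupFold (l : List (String × Int × Int)) :
    ∀ (g : PySem.Dict (List Char) (List Int × List Int)) (k : List Char),
    (l.foldl pvGroupStep g).getD k ([], [])
      = ((g.getD k ([], [])).1 ++ (l.filter (fun q => pvPrefix q.1 == k)).map (fun q => q.2.1),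
         (g.getD k ([], [])).2 ++ (l.filter (fun q => pvPrefix q.1 == k)).map (fun q => q.2.2)) := by
  induction l with
  | nil => intro g k; simp
  | cons q l ih =>
      intro g k
      rw [List.foldl_cons, ih, List.filter_cons]
      by_cases h : pvPrefix q.1 = k
      · simp only [h, beq_self_eq_true, if_pos, List.map_cons]
        rw [pvGroupStep]
        simp only [h]
        rw [PySem.Dict.getD_insert_self]
        simp
      · have hb : (pvPrefix q.1 == k) = false := beq_false_of_ne h
        simp only [hb, Bool.false_eq_true, if_neg, not_false_iff]
        rw [pvGroupStep]
        rw [PySem.Dict.getD_insert_of_ne _ _ _ (Ne.symm h)]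

-- A's update loop over the (nodup) key list: every slot t ends up holding F t.
theorem pv_loopA (px pxe : String → List Int) :
    ∀ (L M : List String) (d : PySem.Dict String (PySem.Dict String (List Int))), L.Nodup → M.Nodup →
    d.items = M.map (fun t => (t, if t ∈ L then PySem.Dict.empty
        else (PySem.Dict.empty.insert "posterior" (px t)).insert "posterior_e" (pxe t))) →
    (∀ t ∈ L, t ∈ M) →
    (L.foldl (fun d t =>
        let d1 := d.insert t ((d.getD t PySem.Dict.empty).insert "posterior" (px t))
        d1.insert t ((d1.getD t PySem.Dict.empty).insert "posterior_e" (pxe t))) d).items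
      = M.map (fun t => (t, (PySem.Dict.empty.insert "posterior" (px t)).insert "posterior_e" (pxe t))) := by
  intro L
  induction L with
  | nil =>
      intro M d _ hM hitems _
      simpa using hitems
  | cons t L ih =>
      intro M d hL hM hitems hsub
      have htM : t ∈ M := hsub t (List.mem_cons_self ..)
      have htL : t ∉ L := (List.nodup_cons.mp hL).1
      have hkeys : d.keys = M := by
        simp only [PySem.Dict.keys, hitems, List.map_map]
        exact (List.map_congr_left (g := fun u => u) (fun u _ => rfl)).trans (List.map_id' M)
      have hknd : d.keys.Nodup := by rw [hkeys]; exact hM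
      have hgt : d.getD t PySem.Dict.empty = PySem.Dict.empty := by
        have hmem : (t, PySem.Dict.empty) ∈ d.items := by
          rw [hitems]
          have h0 : (t, PySem.Dict.empty)
              = (fun u => (u, if u ∈ t :: L then PySem.Dict.empty
                  else (PySem.Dict.empty.insert "posterior" (px u)).insert "posterior_e" (pxe u))) t := by
            simp
          rw [h0]
          exact List.mem_map_of_mem htM
        exact PySem.Dict.getD_of_mem_items _ hmem hknd _
      have hcont : d.contains t = true := by
        rw [PySem.Dict.contains_iff_mem_keys, hkeys]; exact htM
      rw [List.foldl_cons]
      refine ih M _ (List.nodup_cons.mp hL).2 hM ?_ (fun u hu => hsub u (List.mem_cons_of_mem _ hu))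
      show ((d.insert t ((d.getD t PySem.Dict.empty).insert "posterior" (px t))).insert t
          (((d.insert t ((d.getD t PySem.Dict.empty).insert "posterior" (px t))).getD t PySem.Dict.empty).insert
            "posterior_e" (pxe t))).items = _
      rw [PySem.Dict.getD_insert_self, hgt, PySem.Dict.insert_insert_self,
        PySem.Dict.items_insert_of_contains _ _ hcont, hitems, List.map_map]
      apply List.map_congr_left
      intro u _
      simp only [Function.comp]
      by_cases hut : u = t
      · subst hut
        simp [htL]
      · have hbe : (u == t) = false := beq_false_of_ne hut
        simp only [hbe, Bool.false_eq_true, if_neg, not_false_iff]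
        simp [List.mem_cons, hut]

-- ===== VERDICT (by name: the statement is the Claim_ definition above) =====
theorem unpack_tracers_spec : Claim_equal_unpack_tracers := by
  intro tracers se x x_e _ hpre
  unfold Spec_unpack_tracers
  simp only [unpack_tracers, unpack_tracers_alt]
  have hte : (tracers.foldl
        (fun d t => d.insert t (PySem.Dict.empty : PySem.Dict String (List Int))) PySem.Dict.empty).items
      = (PySem.List.dedup tracers).map (fun t => (t, (PySem.Dict.empty : PySem.Dict String (List Int)))) :=
    pv_items_foldl_insert_fn _ _ (fun d t => rfl) tracers
  have hkeys := pv_keys_foldl_insert_fn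
      (fun d t => d.insert t (PySem.Dict.empty : PySem.Dict String (List Int)))
      (fun _ => PySem.Dict.empty) (fun d t => rfl) tracers
  have hnd : (PySem.List.dedup tracers).Nodup := PySem.List.nodup_dedup tracers
  have hitems' : (tracers.foldl
        (fun d t => d.insert t (PySem.Dict.empty : PySem.Dict String (List Int))) PySem.Dict.empty).items
      = (PySem.List.dedup tracers).map (fun t => (t, if t ∈ PySem.List.dedup tracers then PySem.Dict.empty
          else (PySem.Dict.empty.insert "posterior" (pvSliceBySpecies x t se)).insert "posterior_e"
            (pvSliceBySpecies x_e t se))) := by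
    rw [hte]
    apply List.map_congr_left
    intro u hu
    rw [if_pos hu]
  have hloop := pv_loopA (fun t => pvSliceBySpecies x t se) (fun t => pvSliceBySpecies x_e t se)
      (PySem.List.dedup tracers) (PySem.List.dedup tracers) _ hnd hnd hitems' (fun _ h => h)
  rw [hkeys, hloop]
  have hres := pv_items_foldl_insert_fn
      (fun r t =>
        let pr := ((se.zip (x.zip x_e)).foldl pvGroupStep PySem.Dict.empty).getD t.toList ([], [])
        r.insert t [("posterior", pr.1), ("posterior_e", pr.2)])
      (fun t => [("posterior", (((se.zip (x.zip x_e)).foldl pvGroupStep PySem.Dict.empty).getD t.toList ([], [])).1),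
                 ("posterior_e", (((se.zip (x.zip x_e)).foldl pvGroupStep PySem.Dict.empty).getD t.toList ([], [])).2)])
      (fun d t => rfl) tracers
  rw [hres, List.map_map]
  apply List.map_congr_left
  intro t ht
  have htmem : t ∈ tracers := (PySem.List.mem_dedup tracers t).mp ht
  have hgrp := pv_getD_groupFold (se.zip (x.zip x_e)) PySem.Dict.empty t.toList
  have hsl := pv_slice_eq_zip t.toList se 0 x x_e (by
    intro p hp hpt
    refine hpre p ?_ (by rw [hpt]; exact List.mem_map.mpr ⟨t, htmem, rfl⟩)
    simpa using hp)
  simp only [Nat.cast_zero, List.drop_zero] at hsl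
  simp only [Function.comp]
  rw [hgrp, PySem.Dict.getD_empty]
  simp only [List.nil_append]
  rw [show ((PySem.Dict.empty.insert "posterior" (pvSliceBySpecies x t se)).insert "posterior_e"
      (pvSliceBySpecies x_e t se)).items
      = [("posterior", pvSliceBySpecies x t se), ("posterior_e", pvSliceBySpecies x_e t se)] from rfl]
  rw [pvSliceBySpecies, pvSliceBySpecies, hsl.1, hsl.2]
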